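-- pv_equiv track=rewrite | github.com/PeytonSch/algorithms_projects | dynamic_programming/code.py | LP2_recurse
-- ===== SOURCE A (Python) =====
-- def LP2_recurse(n,k,arr):
--
-- 	if(n==1):
-- 		return arr[0]
--
-- 	total = [0] * (n+1)
-- 	total[0] = 0
--
-- 	for i in range(1,n+1):
-- 		total[i] = arr[i-1] + total[i-1]
--
-- 	if(k==1):
-- 		return total[n]
--
--
-- 	all_min_values=[]
--
-- 	for i in range(1,n+1):
--
-- 		totalDiff= total[n]-total[i]
-- 		all_min_values.append(min(LP2_recurse(i,k-1,arr),total[n]-total[i]))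
--
--
-- 	return max(all_min_values)
-- ===== SOURCE B (Python) =====
-- def LP2_recurse(n, k, arr):
--     if n == 1:
--         return arr[0]
--     prefix = [0]
--     for x in arr[:n]:
--         prefix.append(prefix[-1] + x)
--     row = prefix  # DP values for one segment
--     steps = k - 1
--     while steps > 0:
--         new = [0, arr[0]] + [
--             max(min(row[t], prefix[i] - prefix[t]) for t in range(1, i + 1))
--             for i in range(2, n + 1)
--         ]
--         if new == row:
--             break
--         row = new
--         steps -= 1
--     return row[n]
-- ===== Notes on version B (the rewrite author's own statement) =====
-- stated objective: alternative
-- what changed: Replaces A's exponential top-down recursion (which recomputes every (i,k') subproblem and rebuilds the prefix-sum array at each call) by a bottom-up DP over one row per segment count with the prefix sums computed once and an early exit when the row reaches a fixed point.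
import Mathlib
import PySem

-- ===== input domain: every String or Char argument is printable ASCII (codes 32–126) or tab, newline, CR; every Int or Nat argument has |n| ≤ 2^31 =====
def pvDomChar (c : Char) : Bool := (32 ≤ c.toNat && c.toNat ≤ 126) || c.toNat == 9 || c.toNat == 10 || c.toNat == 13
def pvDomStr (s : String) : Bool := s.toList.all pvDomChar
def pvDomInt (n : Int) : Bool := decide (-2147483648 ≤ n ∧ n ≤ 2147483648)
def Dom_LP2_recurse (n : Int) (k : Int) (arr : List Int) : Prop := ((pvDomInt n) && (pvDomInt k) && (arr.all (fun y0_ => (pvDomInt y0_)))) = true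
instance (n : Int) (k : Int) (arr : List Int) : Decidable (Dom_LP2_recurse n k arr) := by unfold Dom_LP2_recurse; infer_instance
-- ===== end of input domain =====

-- B replaces A's exponential top-down recursion by a bottom-up DP over rows (one row per
-- segment count) with the prefix sums computed once and an early exit on a row fixed point.


-- ===== PORT A =====
-- Fuel bounds the recursion depth (Python's recursion terminates iff n = 1 or k ≥ 1, with
-- depth k); the n == 1 test precedes the fuel check just as in Python, and k.toNat fuel is
-- enough on every input Pre_ admits, so the fuel-out branch is never reached there.
def LP2A (arr : List Int) : Nat → Int → Int → Int
  | fuel, n, k =>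
    if n == 1 then (PySem.List.pyGet? arr 0).getD 0
    else
      match fuel with
      | 0 => 0
      | fuel' + 1 =>
        let total := (PySem.List.pyRange 1 (n+1) 1).foldl
          (fun acc i => acc ++ [(PySem.List.pyGet? arr (i-1)).getD 0 + acc.getLastD 0]) [0]
        if k == 1 then (PySem.List.pyGet? total n).getD 0
        else
          let allMin := (PySem.List.pyRange 1 (n+1) 1).foldl
            (fun acc i => acc ++ [min (LP2A arr fuel' i (k-1))
              ((PySem.List.pyGet? total n).getD 0 - (PySem.List.pyGet? total i).getD 0)]) []
          (PySem.List.max? allMin (fun x => x)).getD 0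

def LP2_recurse (n : Int) (k : Int) (arr : List Int) : Int := LP2A arr k.toNat n k

def pvStep (arr prefixL : List Int) (n : Int) (row : List Int) : List Int :=
  [0, (PySem.List.pyGet? arr 0).getD 0] ++
  (PySem.List.pyRange 2 (n+1) 1).map (fun i =>
    (PySem.List.max? ((PySem.List.pyRange 1 (i+1) 1).map (fun t =>
      min ((PySem.List.pyGet? row t).getD 0)
          ((PySem.List.pyGet? prefixL i).getD 0 - (PySem.List.pyGet? prefixL t).getD 0)))
      (fun x => x)).getD 0)

def pvGo (arr prefixL : List Int) (n : Int) : Nat → List Int → List Int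
  | 0, row => row
  | fuel + 1, row =>
    let new := pvStep arr prefixL n row
    if new == row then row else pvGo arr prefixL n fuel new

def LP2_recurse_alt (n : Int) (k : Int) (arr : List Int) : Int :=
  if n == 1 then (PySem.List.pyGet? arr 0).getD 0
  else
    let prefixL := (PySem.List.slice arr (some 0) (some n)).foldl
      (fun acc x => acc ++ [acc.getLastD 0 + x]) [0]
    let row := pvGo arr prefixL n (k-1).toNat prefixL
    (PySem.List.pyGet? row n).getD 0

-- ===== PRECONDITION & SPEC =====
-- Pre_ excludes exactly the inputs on which Python A does not return: n < 0 or n > len(arr)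
-- (IndexError), n = 0 with k ≠ 1 (max() of an empty list, ValueError), and n ≥ 2 with
-- k < 1 (unbounded recursion).
def Pre_LP2_recurse (n : Int) (k : Int) (arr : List Int) : Prop :=
  0 ≤ n ∧ n ≤ (arr.length : Int) ∧ (n = 1 ∨ 1 ≤ k) ∧ (n = 0 → k = 1)
instance (n : Int) (k : Int) (arr : List Int) : Decidable (Pre_LP2_recurse n k arr) := by
  unfold Pre_LP2_recurse; infer_instance

def pvWitness_LP2_recurse : Int × Int × List Int := (4, 3, [1, 2, 3, 4])

def Spec_LP2_recurse (n : Int) (k : Int) (arr : List Int) (out : Int) : Prop := out = LP2_recurse_alt n k arr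
instance (n : Int) (k : Int) (arr : List Int) (out : Int) : Decidable (Spec_LP2_recurse n k arr out) := by unfold Spec_LP2_recurse; infer_instance

-- ===== CLAIM (what is proved, stated in full; the proofs are below) =====
def Claim_equal_LP2_recurse : Prop := ∀ (n : Int) (k : Int) (arr : List Int), Dom_LP2_recurse n k arr → Pre_LP2_recurse n k arr → Spec_LP2_recurse n k arr (LP2_recurse n k arr)

-- ===== LEMMAS AND PROOFS =====

def pvPrefI (arr : List Int) (i : Int) : Int := (arr.take i.toNat).sum

def pvF (arr : List Int) : Nat → Int → Int
  | 0, i => pvPrefI arr i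
  | j+1, i =>
    if i ≤ 1 then pvPrefI arr i
    else (PySem.List.max? ((PySem.List.pyRange 1 (i+1) 1).map (fun t =>
      min (pvF arr j t) (pvPrefI arr i - pvPrefI arr t))) (fun x => x)).getD 0

def pvRow (arr : List Int) (j : Nat) (m : Nat) : List Int :=
  (List.range (m+1)).map (fun (i : Nat) => pvF arr j (i : Int))

theorem pvRow_get (arr : List Int) (j m i : Nat) (h : i ≤ m) :
    (PySem.List.pyGet? (pvRow arr j m) (i : Int)).getD 0 = pvF arr j (i : Int) := by
  rw [PySem.List.pyGet?_natCast, pvRow, List.getElem?_map, List.getElem?_range (by omega)]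
  rfl

theorem pvRow_getLastD (arr : List Int) (j m : Nat) :
    (pvRow arr j m).getLastD 0 = pvF arr j (m : Int) := by
  rw [pvRow, List.getLastD_eq_getLast?, List.getLast?_eq_getElem?]
  simp

theorem pvPrefI_one (arr : List Int) : pvPrefI arr 1 = (PySem.List.pyGet? arr 0).getD 0 := by
  cases arr <;> simp [pvPrefI, PySem.List.pyGet?, PySem.List.pyIdx?]

theorem pvF_one_eq (arr : List Int) (j : Nat) : pvF arr j 1 = (PySem.List.pyGet? arr 0).getD 0 := by
  cases j <;> simp [pvF, pvPrefI_one]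

theorem pvF_zero (arr : List Int) (i : Int) : pvF arr 0 i = pvPrefI arr i := rfl

theorem pvRow_getI (arr : List Int) (j m : Nat) (t : Int) (h0 : 0 ≤ t) (h : t ≤ (m:Int)) :
    (PySem.List.pyGet? (pvRow arr j m) t).getD 0 = pvF arr j t := by
  have := pvRow_get arr j m t.toNat (by omega)
  rwa [show ((t.toNat : Nat) : Int) = t by omega] at this

theorem pvTotalEq (arr : List Int) (n : Int) (h0 : 0 ≤ n) (hl : n ≤ (arr.length : Int)) :
    (PySem.List.pyRange 1 (n+1) 1).foldl
      (fun acc i => acc ++ [(PySem.List.pyGet? arr (i-1)).getD 0 + acc.getLastD 0]) [0]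
      = pvRow arr 0 n.toNat := by
  have key : ∀ m : Nat, (m : Int) ≤ (arr.length : Int) →
      (PySem.List.pyRange 1 ((m : Int)+1) 1).foldl
        (fun acc i => acc ++ [(PySem.List.pyGet? arr (i-1)).getD 0 + acc.getLastD 0]) [0]
        = pvRow arr 0 m := by
    intro m
    induction m with
    | zero => intro _; simp [PySem.List.pyRange_one_eq_nil, pvRow, pvF, pvPrefI]
    | succ m ih =>
      intro hm
      rw [show (((m+1 : Nat)) : Int) + 1 = ((m:Int)+1) + 1 by push_cast; ring,
          PySem.List.pyRange_one_succ_right (by omega), List.foldl_append, ih (by omega)]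
      simp only [List.foldl_cons, List.foldl_nil]
      rw [pvRow_getLastD]
      rw [show ((m:Int)+1) - 1 = (m:Int) by ring, PySem.List.pyGet?_natCast]
      rw [pvRow, pvRow, List.range_succ (n := m + 1), List.map_append]
      congr 1
      simp only [List.map_cons, List.map_nil, List.cons.injEq, and_true]
      have hget : arr[m]? = some arr[m] := List.getElem?_eq_getElem (by omega)
      simp only [pvF, pvPrefI, hget, Option.getD_some]
      rw [show (((m+1:Nat)):Int).toNat = m + 1 by omega, show ((m:Int)).toNat = m by omega,
          Int.add_comm]
      exact List.sum_take_succ arr m (by omega) |>.symm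
  have := key n.toNat (by omega)
  rwa [show ((n.toNat : Int)) = n by omega] at this

theorem pvPrefixEq (arr : List Int) (n : Int) (h0 : 0 ≤ n) (hl : n ≤ (arr.length : Int)) :
    (PySem.List.slice arr (some 0) (some n)).foldl
      (fun acc x => acc ++ [acc.getLastD 0 + x]) [0] = pvRow arr 0 n.toNat := by
  have hs : PySem.List.slice arr (some 0) (some n) = arr.take n.toNat := by
    simp [PySem.List.slice_zero_start, PySem.List.slice_to arr h0]
  rw [hs]
  have key : ∀ m : Nat, m ≤ arr.length →
      (arr.take m).foldl (fun acc x => acc ++ [acc.getLastD 0 + x]) [0] = pvRow arr 0 m := by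
    intro m
    induction m with
    | zero => intro _; simp [pvRow, pvF, pvPrefI]
    | succ m ih =>
      intro hm
      have hget : arr[m]? = some arr[m] := List.getElem?_eq_getElem (by omega)
      rw [List.take_add_one, hget, Option.toList_some, List.foldl_append, ih (by omega)]
      simp only [List.foldl_cons, List.foldl_nil]
      rw [pvRow_getLastD]
      rw [pvRow, pvRow, List.range_succ (n := m + 1), List.map_append]
      congr 1
      simp only [List.map_cons, List.map_nil, List.cons.injEq, and_true]
      simp only [pvF, pvPrefI]
      rw [show (((m+1:Nat)):Int).toNat = m + 1 by omega, show ((m:Int)).toNat = m by omega]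
      exact List.sum_take_succ arr m (by omega) |>.symm
  exact key n.toNat (by omega)

theorem pvStepEq (arr : List Int) (n : Int) (j : Nat) (h2 : 2 ≤ n) (_hl : n ≤ (arr.length : Int)) :
    pvStep arr (pvRow arr 0 n.toNat) n (pvRow arr j n.toNat) = pvRow arr (j+1) n.toNat := by
  apply List.ext_getElem
  · simp [pvStep, pvRow, PySem.List.length_pyRange_one]; omega
  intro idx hL hR
  have hidx : idx < n.toNat + 1 := by simpa [pvRow] using hR
  rw [show (pvRow arr (j+1) n.toNat)[idx]'hR = pvF arr (j+1) (idx : Int) by simp [pvRow]]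
  match idx, hidx with
  | 0, _ =>
    simp [pvStep, pvF, pvPrefI]
  | 1, _ =>
    simp only [pvStep, List.cons_append, List.nil_append, List.getElem_cons_succ,
      List.getElem_cons_zero]
    rw [show ((1:Nat):Int) = (1:Int) by norm_num, pvF_one_eq]
  | (i+2), hidx =>
    simp only [pvStep, List.cons_append, List.nil_append, List.getElem_cons_succ]
    rw [List.getElem_map, PySem.List.getElem_pyRange_one]
    have hcast : (2 : Int) + (i : Nat) = ((i+2 : Nat) : Int) := by push_cast; ring
    rw [hcast]
    have hni : ((i+2 : Nat) : Int) ≤ (n.toNat : Int) := by omega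
    rw [show pvF arr (j+1) ((i+2 : Nat) : Int)
        = (PySem.List.max? ((PySem.List.pyRange 1 (((i+2:Nat):Int)+1) 1).map (fun t =>
            min (pvF arr j t) (pvPrefI arr ((i+2:Nat):Int) - pvPrefI arr t))) (fun x => x)).getD 0
      by rw [pvF]; rw [if_neg (by omega)]]
    congr 2
    apply List.map_congr_left
    intro t ht
    rw [PySem.List.mem_pyRange_one] at ht
    rw [pvRow_getI arr j n.toNat t (by omega) (by omega),
        pvRow_getI arr 0 n.toNat ((i+2:Nat):Int) (by omega) (by omega),
        pvRow_getI arr 0 n.toNat t (by omega) (by omega), pvF_zero, pvF_zero]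

theorem pvRow_stable (arr : List Int) (n : Int) (j : Nat) (h2 : 2 ≤ n) (hl : n ≤ (arr.length : Int))
    (hfix : pvRow arr (j+1) n.toNat = pvRow arr j n.toNat) :
    ∀ m, pvRow arr (j+m) n.toNat = pvRow arr j n.toNat := by
  intro m
  induction m with
  | zero => rfl
  | succ m ih =>
    have : pvRow arr (j+m+1) n.toNat = pvStep arr (pvRow arr 0 n.toNat) n (pvRow arr (j+m) n.toNat) :=
      (pvStepEq arr n (j+m) h2 hl).symm
    rw [show j + (m+1) = j + m + 1 by omega, this, ih, pvStepEq arr n j h2 hl, hfix]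

theorem pvGoEq (arr : List Int) (n : Int) (h2 : 2 ≤ n) (hl : n ≤ (arr.length : Int)) :
    ∀ (fuel : Nat) (j : Nat),
      pvGo arr (pvRow arr 0 n.toNat) n fuel (pvRow arr j n.toNat) = pvRow arr (j+fuel) n.toNat := by
  intro fuel
  induction fuel with
  | zero => intro j; rfl
  | succ fuel ih =>
    intro j
    simp only [pvGo]
    rw [pvStepEq arr n j h2 hl]
    by_cases hfix : pvRow arr (j+1) n.toNat = pvRow arr j n.toNat
    · rw [if_pos (by simpa using hfix)]
      rw [show j + (fuel+1) = j + (fuel+1) by rfl]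
      exact (pvRow_stable arr n j h2 hl hfix (fuel+1)).symm
    · rw [if_neg (by simpa using hfix), ih (j+1)]
      congr 1
      omega

theorem LP2A_n1 (arr : List Int) (fuel : Nat) (k : Int) :
    LP2A arr fuel 1 k = (PySem.List.pyGet? arr 0).getD 0 := by
  rw [LP2A.eq_def]; simp

theorem LP2A_k1 (arr : List Int) (fuel : Nat) (n : Int) (h1 : n ≠ 1) :
    LP2A arr (fuel+1) n 1
      = (PySem.List.pyGet? ((PySem.List.pyRange 1 (n+1) 1).foldl
          (fun acc i => acc ++ [(PySem.List.pyGet? arr (i-1)).getD 0 + acc.getLastD 0]) [0]) n).getD 0 := by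
  rw [LP2A]
  simp only [beq_iff_eq, if_neg h1, if_true]

theorem LP2A_rec (arr : List Int) (fuel : Nat) (n k : Int) (h1 : n ≠ 1) (hk : k ≠ 1) :
    LP2A arr (fuel+1) n k
      = (PySem.List.max? ((PySem.List.pyRange 1 (n+1) 1).foldl
          (fun acc i => acc ++ [min (LP2A arr fuel i (k-1))
            ((PySem.List.pyGet? ((PySem.List.pyRange 1 (n+1) 1).foldl
                (fun acc i => acc ++ [(PySem.List.pyGet? arr (i-1)).getD 0 + acc.getLastD 0]) [0]) n).getD 0
            - (PySem.List.pyGet? ((PySem.List.pyRange 1 (n+1) 1).foldl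
                (fun acc i => acc ++ [(PySem.List.pyGet? arr (i-1)).getD 0 + acc.getLastD 0]) [0]) i).getD 0)]) [])
          (fun x => x)).getD 0 := by
  rw [LP2A]
  simp only [beq_iff_eq, if_neg h1, if_neg hk]

theorem pvAEq (arr : List Int) :
    ∀ (fuel : Nat) (n k : Int), 0 ≤ n → n ≤ (arr.length : Int) →
      (n = 1 ∨ (1 ≤ k ∧ k.toNat ≤ fuel)) →
      LP2A arr fuel n k = pvF arr (k-1).toNat n := by
  intro fuel
  induction fuel with
  | zero =>
    intro n k h0 hl hcase
    have h1 : n = 1 := by rcases hcase with h | ⟨hk, hf⟩ <;> omega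
    subst h1
    rw [LP2A_n1, pvF_one_eq]
  | succ fuel ih =>
    intro n k h0 hl hcase
    by_cases h1 : n = 1
    · subst h1
      rw [LP2A_n1, pvF_one_eq]
    · have hk1 : 1 ≤ k := by rcases hcase with h | ⟨hk, hf⟩ <;> omega
      by_cases hk : k = 1
      · subst hk
        rw [LP2A_k1 arr fuel n h1, pvTotalEq arr n h0 hl,
            pvRow_getI arr 0 n.toNat n h0 (by omega)]
        norm_num
      · have hk2 : 2 ≤ k := by omega
        rw [LP2A_rec arr fuel n k h1 hk, pvTotalEq arr n h0 hl]
        rw [PySem.List.foldl_append_singleton_eq_map, List.nil_append]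
        rw [show (k-1).toNat = (k-2).toNat + 1 by omega]
        by_cases hn0 : n = 0
        · subst hn0
          rw [show pvF arr ((k-2).toNat+1) 0 = pvPrefI arr 0 from by rw [pvF]; rw [if_pos (by omega)]]
          simp [PySem.List.pyRange_one_eq_nil, PySem.List.max?, pvPrefI]
        · have hn2 : 2 ≤ n := by omega
          rw [show pvF arr ((k-2).toNat+1) n
              = (PySem.List.max? ((PySem.List.pyRange 1 (n+1) 1).map (fun t =>
                  min (pvF arr (k-2).toNat t) (pvPrefI arr n - pvPrefI arr t))) (fun x => x)).getD 0
            from by rw [pvF]; rw [if_neg (by omega)]]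
          congr 2
          apply List.map_congr_left
          intro t ht
          rw [PySem.List.mem_pyRange_one] at ht
          rw [ih t (k-1) (by omega) (by omega) (Or.inr (by constructor <;> omega)),
              show ((k-1)-1).toNat = (k-2).toNat by omega,
              pvRow_getI arr 0 n.toNat n h0 (by omega),
              pvRow_getI arr 0 n.toNat t (by omega) (by omega), pvF_zero, pvF_zero]

theorem final (n k : Int) (arr : List Int)
    (h0 : 0 ≤ n) (hl : n ≤ (arr.length : Int)) (hcase : n = 1 ∨ 1 ≤ k) (hz : n = 0 → k = 1) :
    LP2_recurse n k arr = LP2_recurse_alt n k arr := by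
  by_cases h1 : n = 1
  · subst h1
    rw [LP2_recurse, LP2A_n1, LP2_recurse_alt]
    simp
  · have hk1 : 1 ≤ k := by rcases hcase with h | h <;> omega
    rw [LP2_recurse, pvAEq arr k.toNat n k h0 hl (Or.inr (by constructor <;> omega))]
    rw [LP2_recurse_alt, if_neg (by simpa using h1)]
    simp only [pvPrefixEq arr n h0 hl]
    by_cases hn0 : n = 0
    · subst hn0
      have hk : k = 1 := hz rfl
      subst hk
      norm_num [pvGo]
      rw [pvRow_getI arr 0 0 0 (by omega) (by omega)]
    · have hn2 : 2 ≤ n := by omega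
      rw [show pvGo arr (pvRow arr 0 n.toNat) n (k-1).toNat (pvRow arr 0 n.toNat)
          = pvRow arr (0 + (k-1).toNat) n.toNat from pvGoEq arr n hn2 hl (k-1).toNat 0]
      rw [pvRow_getI arr (0 + (k-1).toNat) n.toNat n h0 (by omega)]
      congr 1
      omega

-- ===== VERDICT (by name: the statement is the Claim_ definition above) =====
theorem LP2_recurse_spec : Claim_equal_LP2_recurse := by
  intro n k arr _hDom hPre
  obtain ⟨h0, hl, hcase, hz⟩ := hPre
  exact final n k arr h0 hl hcase hz
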